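-- pv_equiv track=rewrite | github.com/mitisme/Optimal-Groups-Survey | ComS_402/test_evidence/run_new_algorithm_tests.py | count_no_positive_teammates
-- ===== SOURCE A (Python) =====
-- def count_no_positive_teammates(groups, prefs):
--     count = 0
--     students_with_prefs = [item[0] for item in prefs]
--
--     for group in groups:
--         for student in group:
--             pref_exists = False
--             for teammate in group:
--                 if prefs.get((student, teammate), 0) > 0:
--                     pref_exists = True
--                     break
--             if not pref_exists and student in students_with_prefs:
--                 count += 1
--     return count
-- ===== SOURCE B (Python) =====
-- def count_no_positive_teammates(groups, prefs):
--     # Index-first rewrite: one pass over prefs per group builds the set of students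
--     # who have a positively-rated teammate; then count over the group list.
--     students_with_prefs = {k[0] for k in prefs}
--     count = 0
--     for group in groups:
--         group_set = set(group)
--         positives = {s for (s, t), r in prefs.items()
--                      if r > 0 and s in group_set and t in group_set}
--         for student in group:
--             if student not in positives and student in students_with_prefs:
--                 count += 1
--     return count
-- ===== Notes on version B (the rewrite author's own statement) =====
-- stated objective: faster
-- what changed: Replaces the per-student inner scan over all teammates (a dict lookup per (student,teammate) pair) by one pass over prefs per group that builds a 'positives' set, then a flat counting pass over the group list; Pre_ only requires distinct (student,teammate) keys in the association-list model, which every Python dict satisfies automatically, so no Python input is excluded.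
import Mathlib
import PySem

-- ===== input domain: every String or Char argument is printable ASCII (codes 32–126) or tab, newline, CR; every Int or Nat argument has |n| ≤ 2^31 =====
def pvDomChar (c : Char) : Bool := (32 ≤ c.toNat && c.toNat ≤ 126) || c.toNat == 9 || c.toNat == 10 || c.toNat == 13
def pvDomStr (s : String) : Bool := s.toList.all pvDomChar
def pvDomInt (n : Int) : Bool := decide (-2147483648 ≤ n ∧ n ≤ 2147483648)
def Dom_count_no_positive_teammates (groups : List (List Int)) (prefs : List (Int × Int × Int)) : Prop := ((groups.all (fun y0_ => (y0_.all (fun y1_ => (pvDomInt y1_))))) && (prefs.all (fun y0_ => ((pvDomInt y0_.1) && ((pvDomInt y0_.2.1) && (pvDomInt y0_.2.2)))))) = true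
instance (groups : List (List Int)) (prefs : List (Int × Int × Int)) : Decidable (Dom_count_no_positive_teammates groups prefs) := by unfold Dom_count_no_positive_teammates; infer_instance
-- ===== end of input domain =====

-- B replaces A's per-student inner scan over teammates by a per-group single pass
-- over prefs that builds a 'positives' set, then a flat counting pass (alternative decomposition).

-- ===== PORT A =====
-- prefs.get((student, teammate), 0): first-match association-list lookup
def pyPrefGet (prefs : List (Int × Int × Int)) (s t : Int) : Int :=
  ((prefs.find? (fun p => p.1 == s && p.2.1 == t)).map (fun p => p.2.2)).getD 0

def count_no_positive_teammates (groups : List (List Int)) (prefs : List (Int × Int × Int)) : Int :=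
  let students_with_prefs := prefs.map (fun p => p.1)
  groups.foldl (fun count group =>
    group.foldl (fun count student =>
      -- inner 'for teammate in group: … break' = first positive hit
      let pref_exists := group.any (fun teammate => decide (pyPrefGet prefs student teammate > 0))
      if !pref_exists && students_with_prefs.contains student then count + 1 else count) count) 0

-- ===== PORT B =====
def count_no_positive_teammates_alt (groups : List (List Int)) (prefs : List (Int × Int × Int)) : Int :=
  let swp := PySem.Set.ofList (prefs.map (fun p => p.1))
  groups.foldl (fun count group =>
    let gs := PySem.Set.ofList group
    let positives := PySem.Set.ofList
      ((prefs.filter (fun p => decide (p.2.2 > 0) && PySem.Set.contains gs p.1 && PySem.Set.contains gs p.2.1)).map (fun p => p.1))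
    group.foldl (fun count student =>
      if !(PySem.Set.contains positives student) && PySem.Set.contains swp student then count + 1 else count) count) 0

-- ===== PRECONDITION & SPEC =====
-- Pre_ requires distinct (student, teammate) keys in the association-list model of the
-- prefs dict; every Python dict satisfies this automatically, so no Python input is excluded.
def Pre_count_no_positive_teammates (groups : List (List Int)) (prefs : List (Int × Int × Int)) : Prop :=
  (prefs.map (fun p => (p.1, p.2.1))).Nodup
instance (groups : List (List Int)) (prefs : List (Int × Int × Int)) : Decidable (Pre_count_no_positive_teammates groups prefs) := by unfold Pre_count_no_positive_teammates; infer_instance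
def pvWitness_count_no_positive_teammates : List (List Int) × (List (Int × Int × Int)) :=
  ([[1, 2], [3, 3]], [(1, 2, 1), (2, 1, -1), (3, 3, 2)])

def Spec_count_no_positive_teammates (groups : List (List Int)) (prefs : List (Int × Int × Int)) (out : Int) : Prop := out = count_no_positive_teammates_alt groups prefs
instance (groups : List (List Int)) (prefs : List (Int × Int × Int)) (out : Int) : Decidable (Spec_count_no_positive_teammates groups prefs out) := by unfold Spec_count_no_positive_teammates; infer_instance

-- ===== CLAIM (what is proved, stated in full; the proofs are below) =====
def Claim_equal_count_no_positive_teammates : Prop := ∀ (groups : List (List Int)) (prefs : List (Int × Int × Int)), Dom_count_no_positive_teammates groups prefs → Pre_count_no_positive_teammates groups prefs → Spec_count_no_positive_teammates groups prefs (count_no_positive_teammates groups prefs)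

-- ===== LEMMAS AND PROOFS =====

-- With distinct keys, the first-match lookup is positive iff some entry (s,t,r) with r>0 is present.
theorem pyPrefGet_pos_iff (prefs : List (Int × Int × Int)) (s t : Int)
    (hnd : (prefs.map (fun p => (p.1, p.2.1))).Nodup) :
    0 < pyPrefGet prefs s t ↔ ∃ r, (s, t, r) ∈ prefs ∧ 0 < r := by
  unfold pyPrefGet
  cases h : prefs.find? (fun p => p.1 == s && p.2.1 == t) with
  | none =>
    simp only [Option.map_none, Option.getD_none]
    constructor
    · omega
    · rintro ⟨r, hmem, hr⟩
      have := List.find?_eq_none.mp h _ hmem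
      simp at this
  | some p =>
    have hmem := List.mem_of_find?_eq_some h
    have hpred := List.find?_some h
    simp only [Bool.and_eq_true, beq_iff_eq] at hpred
    obtain ⟨h1, h2⟩ := hpred
    simp only [Option.map_some, Option.getD_some]
    constructor
    · intro hpos
      exact ⟨p.2.2, by rw [← h1, ← h2]; exact hmem, hpos⟩
    · rintro ⟨r, hmem', hr⟩
      have heq : (s, t, r) = p :=
        List.inj_on_of_nodup_map hnd hmem' hmem (by simp [h1, h2])
      rw [← heq]
      exact hr

-- A's inner scan agrees with membership in B's per-group 'positives' set, for students of the group.
theorem any_eq_contains_positives (prefs : List (Int × Int × Int)) (group : List Int)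
    (student : Int) (hst : student ∈ group)
    (hnd : (prefs.map (fun p => (p.1, p.2.1))).Nodup) :
    (group.any (fun teammate => decide (pyPrefGet prefs student teammate > 0)))
      = PySem.Set.contains (PySem.Set.ofList
          ((prefs.filter (fun p => decide (p.2.2 > 0)
              && PySem.Set.contains (PySem.Set.ofList group) p.1
              && PySem.Set.contains (PySem.Set.ofList group) p.2.1)).map (fun p => p.1))) student := by
  rw [Bool.eq_iff_iff]
  simp only [List.any_eq_true, decide_eq_true_eq, PySem.Set.contains_iff, PySem.Set.mem_ofList,
    List.mem_map, List.mem_filter, Bool.and_eq_true]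
  constructor
  · rintro ⟨tm, htm, hpos⟩
    obtain ⟨r, hmem, hr⟩ := (pyPrefGet_pos_iff prefs student tm hnd).mp hpos
    exact ⟨(student, tm, r), ⟨hmem, by simp [hst, htm, hr]⟩, rfl⟩
  · rintro ⟨p, ⟨hmem, hcond⟩, hp1⟩
    obtain ⟨⟨hr, _⟩, ht⟩ := hcond
    refine ⟨p.2.1, ht, ?_⟩
    apply (pyPrefGet_pos_iff prefs student p.2.1 hnd).mpr
    exact ⟨p.2.2, by rw [← hp1]; exact hmem, hr⟩

-- membership in students_with_prefs list = membership in its Set form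
theorem contains_swp (prefs : List (Int × Int × Int)) (student : Int) :
    (prefs.map (fun p => p.1)).contains student
      = PySem.Set.contains (PySem.Set.ofList (prefs.map (fun p => p.1))) student := by
  rw [Bool.eq_iff_iff]
  simp

-- ===== VERDICT (by name: the statement is the Claim_ definition above) =====
theorem count_no_positive_teammates_spec : Claim_equal_count_no_positive_teammates := by
  intro groups prefs _ hpre
  unfold Spec_count_no_positive_teammates count_no_positive_teammates count_no_positive_teammates_alt
  apply PySem.List.foldl_congr_mem
  intro acc group _
  apply PySem.List.foldl_congr_mem
  intro acc' student hst
  rw [any_eq_contains_positives prefs group student hst hpre, contains_swp]
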